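-- pv_equiv track=rewrite | github.com/dercaft/XNAS | xnas/search_space/cell_based.py | darts_weight_unpack
-- ===== SOURCE A (Python) =====
-- def darts_weight_unpack(weight, n_nodes, input_nodes=2):
--     """
--         Unpack 2d weight matrix to dag
--     """
--     w_dag = []
--     start_index = 0
--     end_index = input_nodes
--     for i in range(n_nodes):
--         w_dag.append(weight[start_index:end_index])
--         start_index = end_index
--         end_index += input_nodes + i + 1
--     return w_dag
-- ===== SOURCE B (Python) =====
-- def darts_weight_unpack(weight, n_nodes, input_nodes=2):
--     """
--         Unpack 2d weight matrix to dag
--     """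
--     return [weight[i * input_nodes + i * (i - 1) // 2
--                    : (i + 1) * input_nodes + i * (i + 1) // 2]
--             for i in range(n_nodes)]
-- ===== Notes on version B (the rewrite author's own statement) =====
-- stated objective: simpler
-- what changed: Replaces the loop-carried start/end accumulators with a stateless list comprehension whose slice bounds are closed-form triangular-number offsets per index.
import Mathlib
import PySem

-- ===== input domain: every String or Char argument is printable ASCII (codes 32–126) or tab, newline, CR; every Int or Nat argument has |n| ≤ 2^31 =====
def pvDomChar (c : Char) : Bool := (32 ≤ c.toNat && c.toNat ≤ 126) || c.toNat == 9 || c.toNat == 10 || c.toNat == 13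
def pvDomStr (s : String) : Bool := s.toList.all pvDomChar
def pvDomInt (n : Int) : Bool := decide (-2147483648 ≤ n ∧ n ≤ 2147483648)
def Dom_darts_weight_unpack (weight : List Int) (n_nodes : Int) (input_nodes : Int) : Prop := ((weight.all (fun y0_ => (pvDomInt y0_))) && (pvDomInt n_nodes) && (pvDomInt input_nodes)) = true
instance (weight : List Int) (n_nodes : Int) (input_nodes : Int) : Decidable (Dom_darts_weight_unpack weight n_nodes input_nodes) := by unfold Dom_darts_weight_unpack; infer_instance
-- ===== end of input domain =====

-- B replaces A's loop-carried start/end accumulators with a stateless comprehension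
-- using closed-form triangular-offset slice bounds (objective: simpler).


-- ===== PORT A =====
-- loop state: (w_dag, start_index, end_index)
def darts_weight_unpack (weight : List Int) (n_nodes : Int) (input_nodes : Int) : List (List Int) :=
  ((PySem.List.pyRange 0 n_nodes 1).foldl
    (fun (st : List (List Int) × Int × Int) i =>
      (st.1 ++ [PySem.List.slice weight (some st.2.1) (some st.2.2)],
       st.2.2,
       st.2.2 + input_nodes + i + 1))
    ([], 0, input_nodes)).1

-- ===== PORT B =====
def darts_weight_unpack_alt (weight : List Int) (n_nodes : Int) (input_nodes : Int) : List (List Int) :=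
  (PySem.List.pyRange 0 n_nodes 1).map (fun i =>
    PySem.List.slice weight
      (some (i * input_nodes + PySem.Int.floordiv (i * (i - 1)) 2))
      (some ((i + 1) * input_nodes + PySem.Int.floordiv (i * (i + 1)) 2)))

-- ===== PRECONDITION & SPEC =====
def Spec_darts_weight_unpack (weight : List Int) (n_nodes : Int) (input_nodes : Int) (out : List (List Int)) : Prop := out = darts_weight_unpack_alt weight n_nodes input_nodes
instance (weight : List Int) (n_nodes : Int) (input_nodes : Int) (out : List (List Int)) : Decidable (Spec_darts_weight_unpack weight n_nodes input_nodes out) := by unfold Spec_darts_weight_unpack; infer_instance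

-- ===== CLAIM (what is proved, stated in full; the proofs are below) =====
def Claim_equal_darts_weight_unpack : Prop := ∀ (weight : List Int) (n_nodes : Int) (input_nodes : Int), Dom_darts_weight_unpack weight n_nodes input_nodes → Spec_darts_weight_unpack weight n_nodes input_nodes (darts_weight_unpack weight n_nodes input_nodes)

-- ===== LEMMAS AND PROOFS =====

-- triangular offset step: (i*(i+1))//2 = (i*(i-1))//2 + i  (exact division, divisor 2 > 0)
lemma dwu_tri_step (i : Int) :
    PySem.Int.floordiv (i * (i + 1)) 2 = PySem.Int.floordiv (i * (i - 1)) 2 + i := by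
  rw [PySem.Int.floordiv_eq_ediv_of_pos (by omega), PySem.Int.floordiv_eq_ediv_of_pos (by omega)]
  have h : i * (i + 1) = i * (i - 1) + i * 2 := by ring
  rw [h, Int.add_mul_ediv_right _ _ (by omega : (2:Int) ≠ 0)]

-- loop invariant: after processing range(m), the state is (B's chunks, closed-form start, closed-form end)
lemma dwu_inv (weight : List Int) (c : Int) (m : Nat) :
    ((PySem.List.pyRange 0 (m : Int) 1).foldl
      (fun (st : List (List Int) × Int × Int) i =>
        (st.1 ++ [PySem.List.slice weight (some st.2.1) (some st.2.2)],
         st.2.2,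
         st.2.2 + c + i + 1))
      ([], 0, c))
    = ((PySem.List.pyRange 0 (m : Int) 1).map (fun i =>
        PySem.List.slice weight
          (some (i * c + PySem.Int.floordiv (i * (i - 1)) 2))
          (some ((i + 1) * c + PySem.Int.floordiv (i * (i + 1)) 2))),
       (m : Int) * c + PySem.Int.floordiv ((m : Int) * ((m : Int) - 1)) 2,
       ((m : Int) + 1) * c + PySem.Int.floordiv ((m : Int) * ((m : Int) + 1)) 2) := by
  induction m with
  | zero =>
      simp [PySem.List.pyRange_one_eq_nil (by omega : (0:Int) ≤ 0), PySem.Int.floordiv]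
  | succ k ih =>
      have hc : ((k + 1 : Nat) : Int) = (k : Int) + 1 := by push_cast; ring
      rw [hc, PySem.List.pyRange_one_succ_right (by positivity : (0:Int) ≤ (k : Int)),
          List.foldl_append, List.map_append, ih]
      simp only [List.foldl_cons, List.foldl_nil, List.map_cons, List.map_nil]
      have h1 : ((k:Int) + 1) * (((k:Int) + 1) - 1) = (k:Int) * ((k:Int) + 1) := by ring
      have h2 := dwu_tri_step ((k:Int) + 1)
      rw [h1] at h2
      refine congrArg₂ Prod.mk rfl (congrArg₂ Prod.mk ?_ ?_)
      · rw [h1]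
      · rw [h2]; ring

-- ===== VERDICT (by name: the statement is the Claim_ definition above) =====
theorem darts_weight_unpack_spec : Claim_equal_darts_weight_unpack := by
  intro weight n_nodes input_nodes _
  unfold Spec_darts_weight_unpack darts_weight_unpack darts_weight_unpack_alt
  by_cases h : n_nodes ≤ 0
  · rw [PySem.List.pyRange_one_eq_nil h]; rfl
  · obtain ⟨m, rfl⟩ : ∃ m : Nat, n_nodes = (m : Int) :=
      ⟨n_nodes.toNat, (Int.toNat_of_nonneg (by omega)).symm⟩
    rw [dwu_inv]
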